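-- pv_equiv track=rewrite | github.com/Kokonico/ciphernoob | ciphers/utils.py | row_column_converter
-- ===== SOURCE A (Python) =====
-- def row_column_converter(input_data, is_dict):
--     if is_dict:
--         max_len = max(len(v) for v in input_data.values())
--         result = {
--             i: "".join(v[i % len(v)] if len(v) > i else "" for v in input_data.values())
--             for i in range(max_len)
--         }
--     else:
--         max_len = max(len(v) for v in input_data)
--         result = {
--             i: "".join(v[i % len(v)] if len(v) > i else "" for v in input_data)
--             for i in range(max_len)
--         }
--     return result
-- ===== SOURCE B (Python) =====
-- def row_column_converter(input_data, is_dict):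
--     values = list(input_data.values()) if is_dict else input_data
--     buckets = []
--     for v in values:
--         for i, c in enumerate(v):
--             if i < len(buckets):
--                 buckets[i] += c
--             else:
--                 buckets.append(c)
--     return {i: b for i, b in enumerate(buckets)}
-- ===== Notes on version B (the rewrite author's own statement) =====
-- stated objective: faster
-- what changed: A builds each column by rescanning every string once per column index (max_len passes over the whole list); B makes a single pass per string, appending each character to its per-index bucket, then emits the buckets.
import Mathlib
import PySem

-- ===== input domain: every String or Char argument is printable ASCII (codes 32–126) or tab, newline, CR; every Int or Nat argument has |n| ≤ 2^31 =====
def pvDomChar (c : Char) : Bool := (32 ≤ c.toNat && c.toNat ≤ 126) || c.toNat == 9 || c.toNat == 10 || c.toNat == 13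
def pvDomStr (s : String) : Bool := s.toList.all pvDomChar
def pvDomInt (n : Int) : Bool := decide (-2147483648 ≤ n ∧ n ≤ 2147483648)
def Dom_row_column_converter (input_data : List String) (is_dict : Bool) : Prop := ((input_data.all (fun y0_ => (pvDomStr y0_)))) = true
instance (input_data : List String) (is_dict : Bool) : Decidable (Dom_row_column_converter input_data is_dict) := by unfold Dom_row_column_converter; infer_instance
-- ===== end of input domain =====

-- B replaces A's per-column rescan of the whole list (one pass over ALL strings for EACH column index)
-- by a single pass per string that appends each character to its per-index bucket.

-- ===== PORT A =====
-- A, transliterated: max over the lengths, then for each i in range(max_len) a join over ALL strings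
-- of v[i % len(v)] (a one-char piece) when len(v) > i, else "".
def row_column_converter (input_data : List String) (is_dict : Bool) : List (Int × String) :=
  if is_dict then
    []  -- Python raises AttributeError here (a list has no .values()); excluded by Pre_
  else
    match PySem.List.max? (input_data.map fun v => PySem.Str.len v) (fun x => x) with
    | none => []  -- Python raises ValueError (max() of an empty sequence); excluded by Pre_
    | some maxLen =>
      (PySem.List.pyRange 0 maxLen 1).map fun i =>
        (i, String.ofList (PySem.Chars.join [] (input_data.map fun v =>
              if i < PySem.Str.len v then
                match PySem.Str.pyGet? v (PySem.Int.mod i (PySem.Str.len v)) with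
                | some c => [c]
                | none => []   -- unreachable: the index is in range
               else [])))


-- ===== PORT B =====
-- Source B's inner enumerate loop over one string: append its chars to the existing buckets,
-- position by position, growing the bucket list when the string is the longest so far
def pvMerge : List (List Char) → List Char → List (List Char)
  | bs, [] => bs
  | [], c :: cs => [c] :: pvMerge [] cs
  | b :: bs, c :: cs => (b ++ [c]) :: pvMerge bs cs

def row_column_converter_alt (input_data : List String) (is_dict : Bool) : List (Int × String) :=
  if is_dict then
    []  -- Python raises AttributeError here too (.values() on a list); excluded by Pre_
  else
    let buckets := input_data.foldl (fun bs v => pvMerge bs v.toList) []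
    (PySem.List.enumerate buckets 0).map fun p => (p.1, String.ofList p.2)


-- ===== PRECONDITION & SPEC =====
-- Pre_ excludes is_dict = true (A calls .values() on the list argument: AttributeError) and the
-- empty list (max() of an empty sequence: ValueError); on both A raises and returns nothing.
def Pre_row_column_converter (input_data : List String) (is_dict : Bool) : Prop :=
  is_dict = false ∧ input_data ≠ []
instance (input_data : List String) (is_dict : Bool) : Decidable (Pre_row_column_converter input_data is_dict) := by unfold Pre_row_column_converter; infer_instance
def pvWitness_row_column_converter : List String × Bool := (["abc", "de", "fghi"], false)

def Spec_row_column_converter (input_data : List String) (is_dict : Bool) (out : List (Int × String)) : Prop := out = row_column_converter_alt input_data is_dict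
instance (input_data : List String) (is_dict : Bool) (out : List (Int × String)) : Decidable (Spec_row_column_converter input_data is_dict out) := by unfold Spec_row_column_converter; infer_instance

-- ===== CLAIM (what is proved, stated in full; the proofs are below) =====
def Claim_equal_row_column_converter : Prop := ∀ (input_data : List String) (is_dict : Bool), Dom_row_column_converter input_data is_dict → Pre_row_column_converter input_data is_dict → Spec_row_column_converter input_data is_dict (row_column_converter input_data is_dict)
-- ===== LEMMAS AND PROOFS =====

def pvCol (vs : List String) (i : Nat) : List Char := vs.filterMap (fun v => v.toList[i]?)
def pvMaxLen (vs : List String) : Nat := vs.foldl (fun m v => max m v.toList.length) 0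

theorem pvFlatten_filterMap (vs : List String) (i : Nat) :
    (vs.map fun v => v.toList[i]?.toList).flatten = vs.filterMap (fun v => v.toList[i]?) := by
  induction vs with
  | nil => rfl
  | cons l t ih =>
    simp only [List.map_cons, List.flatten_cons, List.filterMap_cons, ih]
    cases l.toList[i]? <;> simp

theorem pvJoin_nil_flatten (ps : List (List Char)) : PySem.Chars.join [] ps = ps.flatten := by
  match ps with
  | [] => simp [PySem.Chars.join_nil]
  | [p] => simp [PySem.Chars.join_singleton]
  | p :: q :: rest =>
    rw [PySem.Chars.join_cons_cons, pvJoin_nil_flatten (q :: rest)]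
    simp

theorem pvMerge_getElem? (bs : List (List Char)) (cs : List Char) (i : Nat) :
    (pvMerge bs cs)[i]? = match bs[i]?, cs[i]? with
      | some b, some c => some (b ++ [c])
      | some b, none => some b
      | none, some c => some [c]
      | none, none => none := by
  induction bs generalizing cs i with
  | nil =>
    induction cs generalizing i with
    | nil => simp [pvMerge]
    | cons c cs ih =>
      match i with
      | 0 => simp [pvMerge]
      | (k+1) => simp [pvMerge, ih]
  | cons b bs ih =>
    match cs with
    | [] => simp [pvMerge]; cases (b :: bs)[i]? <;> simp
    | c :: cs =>
      match i with
      | 0 => simp [pvMerge]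
      | (k+1) => simp [pvMerge, ih]

theorem pvEnumerate_getElem? {α : Type} (bs : List α) (s : Int) (k : Nat) :
    (PySem.List.enumerate bs s)[k]? = bs[k]?.map (fun b => (s + k, b)) := by
  induction bs generalizing s k with
  | nil => simp [PySem.List.enumerate_nil]
  | cons b bs ih =>
    match k with
    | 0 => simp [PySem.List.enumerate_cons]
    | (k+1) => simp [PySem.List.enumerate_cons, ih]; ring_nf

theorem pvFold_getElem? (vs : List String) (bs : List (List Char)) (i : Nat) :
    (vs.foldl (fun bs v => pvMerge bs v.toList) bs)[i]? = match bs[i]? with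
      | some b => some (b ++ pvCol vs i)
      | none => if pvCol vs i = [] then none else some (pvCol vs i) := by
  induction vs generalizing bs with
  | nil => cases hb : bs[i]? <;> simp [pvCol, hb]
  | cons v t ih =>
    simp only [List.foldl_cons, ih, pvMerge_getElem?, pvCol, List.filterMap_cons]
    cases hb : bs[i]? <;> cases hv : v.toList[i]? <;> simp [pvCol]

theorem pvFoldl_max_cast (l : List Nat) (a : Nat) :
    List.foldl max ((a : Nat) : Int) (l.map (fun n => ((n : Nat) : Int))) = ((l.foldl max a : Nat) : Int) := by
  induction l generalizing a with
  | nil => simp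
  | cons n r ih => simp only [List.map_cons, List.foldl_cons, ← Nat.cast_max, ih]

theorem pvMax_eq (v : String) (t : List String) :
    List.foldl max (PySem.Str.len v) (t.map fun u => PySem.Str.len u) = ((pvMaxLen (v :: t) : Nat) : Int) := by
  have h1 : (t.map fun u => PySem.Str.len u) = (t.map fun u => u.toList.length).map (fun n => ((n : Nat) : Int)) := by
    simp [PySem.Str.len_eq]
  have h2 : PySem.Str.len v = ((v.toList.length : Nat) : Int) := by simp [PySem.Str.len_eq]
  rw [h1, h2, pvFoldl_max_cast]
  have h3 : pvMaxLen (v :: t) = (t.map fun u => u.toList.length).foldl max v.toList.length := by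
    simp [pvMaxLen, List.foldl_map]
  rw [h3]

theorem pvLt_foldl_max (l : List Nat) (a i : Nat) :
    i < l.foldl max a ↔ i < a ∨ ∃ n ∈ l, i < n := by
  induction l generalizing a with
  | nil => simp
  | cons n r ih => rw [List.foldl_cons, ih]; simp [or_assoc]

theorem pvCol_lt_iff (vs : List String) (i : Nat) : pvCol vs i ≠ [] ↔ i < pvMaxLen vs := by
  have h1 : pvCol vs i ≠ [] ↔ ∃ v ∈ vs, i < v.toList.length := by
    simp [pvCol, List.filterMap_eq_nil_iff]
  have h2 : pvMaxLen vs = (vs.map (fun v => v.toList.length)).foldl max 0 := by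
    simp [pvMaxLen, List.foldl_map]
  rw [h1, h2, pvLt_foldl_max]
  simp

-- A on a nonempty list equals the canonical column table
theorem pvA_eq (v : String) (t : List String) :
    row_column_converter (v :: t) false
      = (List.range (pvMaxLen (v :: t))).map (fun (k : Nat) => ((k : Int), String.ofList (pvCol (v :: t) k))) := by
  have hmax : PySem.List.max? ((v :: t).map fun u => PySem.Str.len u) (fun x => x)
      = some ((pvMaxLen (v :: t) : Nat) : Int) := by
    rw [List.map_cons, PySem.List.max?_id_cons, pvMax_eq]
  rw [row_column_converter]
  rw [if_neg Bool.false_ne_true]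
  rw [hmax]
  simp only []
  rw [show PySem.List.pyRange 0 ((pvMaxLen (v :: t) : Nat) : Int) 1
      = (List.range (pvMaxLen (v :: t))).map (fun k => ((k : Nat) : Int)) from PySem.List.pyRange_zero_nat _]
  rw [List.map_map]
  apply List.map_congr_left
  intro k hk
  rw [List.mem_range] at hk
  simp only [Function.comp]
  congr 1
  have hpieces : ((v :: t).map fun u =>
      if ((k : Nat) : Int) < PySem.Str.len u then
        match PySem.Str.pyGet? u (PySem.Int.mod ((k : Nat) : Int) (PySem.Str.len u)) with
        | some c => [c]
        | none => []
      else []) = (v :: t).map fun u => (u.toList[k]?.toList) := by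
    apply List.map_congr_left
    intro u _
    by_cases hu : k < u.toList.length
    · have hlen : PySem.Str.len u = ((u.toList.length : Nat) : Int) := by simp [PySem.Str.len_eq]
      rw [if_pos (by rw [hlen]; exact_mod_cast hu)]
      rw [hlen, PySem.Int.mod_natCast, Nat.mod_eq_of_lt hu]
      rw [show PySem.Str.pyGet? u ((k : Nat) : Int) = u.toList[k]? from PySem.Str.pyGet?_natCast u k]
      rw [List.getElem?_eq_getElem hu]
      simp
    · have hlen : PySem.Str.len u = ((u.toList.length : Nat) : Int) := by simp [PySem.Str.len_eq]
      rw [if_neg (by rw [hlen]; exact_mod_cast hu)]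
      rw [List.getElem?_eq_none (by omega)]
      simp
  rw [hpieces, pvJoin_nil_flatten, pvFlatten_filterMap]
  rfl

-- B equals the canonical column table
theorem pvB_eq (vs : List String) :
    row_column_converter_alt vs false
      = (List.range (pvMaxLen vs)).map (fun (k : Nat) => ((k : Int), String.ofList (pvCol vs k))) := by
  rw [row_column_converter_alt]
  rw [if_neg Bool.false_ne_true]
  apply List.ext_getElem?
  intro k
  rw [List.getElem?_map, pvEnumerate_getElem?, pvFold_getElem? vs [] k]
  simp only [List.getElem?_nil]
  rw [List.getElem?_map]
  by_cases hk : k < pvMaxLen vs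
  · have hne : pvCol vs k ≠ [] := (pvCol_lt_iff vs k).2 hk
    rw [if_neg hne, List.getElem?_range hk]
    simp
  · have heq : pvCol vs k = [] := by
      by_contra h; exact hk ((pvCol_lt_iff vs k).1 h)
    rw [if_pos heq, List.getElem?_eq_none (by simp; omega)]
    simp


-- ===== VERDICT (by name: the statement is the Claim_ definition above) =====
theorem row_column_converter_spec : Claim_equal_row_column_converter := by
  intro vs d _ hp
  unfold Spec_row_column_converter
  obtain ⟨hd, hne⟩ := hp
  subst hd
  match vs, hne with
  | v :: t, _ => rw [pvA_eq, pvB_eq]
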